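-- pv_equiv track=rewrite | github.com/ChromeUniverse/mit-6.0001-psets | ps5/ps5.py | phrase_words_in_text_words
-- ===== SOURCE A (Python) =====
-- def phrase_words_in_text_words(phrase_words: list[str], text_words: list[str]):
--     '''
--     phrase_words (list[str])
--     text_words (list[str])
--     '''
--     # loop over words in the text
--     for i in range(len(text_words)):
--         word = text_words[i]
--         if (word == phrase_words[0]):
--
--             # found a match
--             if (len(phrase_words) == 1):
--                 # if phrase only has a single word, we're done (base case)
--                 return True
--             # no match: recursive case
--             else:
--                 return phrase_words_in_text_words(phrase_words[1:], text_words[i+1:])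
--
--     return False
-- ===== SOURCE B (Python) =====
-- def phrase_words_in_text_words(phrase_words: list[str], text_words: list[str]):
--     '''
--     phrase_words (list[str])
--     text_words (list[str])
--     '''
--     # single-pass two-pointer greedy subsequence match, no list slicing
--     k = 0
--     for word in text_words:
--         if k < len(phrase_words) and word == phrase_words[k]:
--             k += 1
--     return k >= len(phrase_words)
-- ===== Notes on version B (the rewrite author's own statement) =====
-- stated objective: alternative
-- what changed: Replaced the slice-and-recurse search (recursion on phrase_words[1:]/text_words[i+1:] at each match) with an iterative single-pass two-pointer scan keeping one match index and no slicing.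
-- outside the precondition, e.g. on phrase_words_in_text_words([], []): A returns False, B returns True
import Mathlib
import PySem

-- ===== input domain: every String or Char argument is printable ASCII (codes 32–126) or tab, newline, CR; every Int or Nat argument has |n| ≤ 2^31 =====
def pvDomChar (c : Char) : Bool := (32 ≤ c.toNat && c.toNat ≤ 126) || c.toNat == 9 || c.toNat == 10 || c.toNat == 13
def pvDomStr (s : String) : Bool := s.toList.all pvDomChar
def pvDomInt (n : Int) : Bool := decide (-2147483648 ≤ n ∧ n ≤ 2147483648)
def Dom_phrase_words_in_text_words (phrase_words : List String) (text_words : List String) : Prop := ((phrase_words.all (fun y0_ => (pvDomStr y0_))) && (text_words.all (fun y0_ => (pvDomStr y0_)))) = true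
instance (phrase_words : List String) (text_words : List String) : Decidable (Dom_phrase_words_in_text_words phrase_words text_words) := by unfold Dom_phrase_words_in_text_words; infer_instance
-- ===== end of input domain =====

-- ===== PORT A =====
-- B replaces A's slice-and-recurse search with an iterative single-pass two-pointer scan (no slicing).
-- A: first-match recursion; the 'for i' loop scanning text_words is the tail recursion on the
-- text list (a mismatching word advances the loop); on a match of phrase_words[0] it returns True
-- for a one-word phrase or recurses on phrase_words[1:] and text_words[i+1:] (= the remaining list).
def phrase_words_in_text_words (phrase_words : List String) (text_words : List String) : Bool :=
  match text_words with
  | [] => false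
  | word :: rest =>
    match PySem.List.pyGet? phrase_words 0 with
    | none => false   -- phrase_words[0] raises IndexError in Python; excluded by Pre_
    | some p0 =>
      if word = p0 then
        if phrase_words.length = 1 then true
        else phrase_words_in_text_words (PySem.List.slice phrase_words (some 1) none) rest
      else phrase_words_in_text_words phrase_words rest

-- ===== PORT B =====
def phrase_words_in_text_words_alt (phrase_words : List String) (text_words : List String) : Bool :=
  let k := text_words.foldl
    (fun (k : Nat) word =>
      if k < phrase_words.length ∧ word = phrase_words.getD k "" then k + 1 else k) 0
  decide (phrase_words.length ≤ k)

-- ===== PRECONDITION & SPEC =====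
-- Pre_ excludes empty phrase_words: there A raises IndexError (phrase_words[0]) for nonempty text,
-- and on empty text its loop never runs so it accidentally returns False, while B's vacuous-match True
-- is as defensible; no caller would specify either.
def Pre_phrase_words_in_text_words (phrase_words : List String) (text_words : List String) : Prop :=
  phrase_words ≠ []
instance (phrase_words : List String) (text_words : List String) : Decidable (Pre_phrase_words_in_text_words phrase_words text_words) := by unfold Pre_phrase_words_in_text_words; infer_instance
def pvWitness_phrase_words_in_text_words : List String × List String := (["a", "b"], ["a", "x", "b"])
def Spec_phrase_words_in_text_words (phrase_words : List String) (text_words : List String) (out : Bool) : Prop := out = phrase_words_in_text_words_alt phrase_words text_words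
instance (phrase_words : List String) (text_words : List String) (out : Bool) : Decidable (Spec_phrase_words_in_text_words phrase_words text_words out) := by unfold Spec_phrase_words_in_text_words; infer_instance

-- ===== CLAIM (what is proved, stated in full; the proofs are below) =====
def Claim_equal_phrase_words_in_text_words : Prop := ∀ (phrase_words : List String) (text_words : List String), Dom_phrase_words_in_text_words phrase_words text_words → Pre_phrase_words_in_text_words phrase_words text_words → Spec_phrase_words_in_text_words phrase_words text_words (phrase_words_in_text_words phrase_words text_words)

-- ===== LEMMAS AND PROOFS =====

-- step function of B's fold
def pvStep (pw : List String) (k : Nat) (word : String) : Nat :=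
  if k < pw.length ∧ word = pw.getD k "" then k + 1 else k

theorem pvStep_le (pw : List String) (k : Nat) (w : String) : k ≤ pvStep pw k w := by
  unfold pvStep; split <;> omega

theorem pvFold_le (pw : List String) (ts : List String) (k : Nat) :
    k ≤ ts.foldl (pvStep pw) k := by
  induction ts generalizing k with
  | nil => simp
  | cons w ts ih => exact le_trans (pvStep_le pw k w) (ih _)

theorem pvFold_shift (p0 : String) (pr ts : List String) (k : Nat) :
    ts.foldl (pvStep (p0 :: pr)) (k + 1) = ts.foldl (pvStep pr) k + 1 := by
  induction ts generalizing k with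
  | nil => simp
  | cons w ts ih =>
    have hc : (k + 1 < (p0 :: pr).length ∧ w = (p0 :: pr).getD (k + 1) "")
        ↔ (k < pr.length ∧ w = pr.getD k "") := by
      simp only [List.length_cons, List.getD_cons_succ]
      constructor <;> rintro ⟨h1, h2⟩ <;> exact ⟨by omega, h2⟩
    have hstep : pvStep (p0 :: pr) (k + 1) w = pvStep pr k w + 1 := by
      unfold pvStep
      rw [if_congr hc rfl rfl]
      split <;> rfl
    simp [List.foldl, hstep, ih]

theorem pvMain (ts pw : List String) (hpw : pw ≠ []) :
    phrase_words_in_text_words pw ts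
      = decide (pw.length ≤ ts.foldl (pvStep pw) 0) := by
  induction ts generalizing pw with
  | nil =>
    obtain ⟨p0, pr, rfl⟩ := List.exists_cons_of_ne_nil hpw
    simp [phrase_words_in_text_words]
  | cons w ts ih =>
    obtain ⟨p0, pr, rfl⟩ := List.exists_cons_of_ne_nil hpw
    rw [phrase_words_in_text_words]
    simp only [PySem.List.pyGet?_zero_cons]
    by_cases hw : w = p0
    · subst hw
      rw [if_pos rfl]
      have hstep0 : pvStep (w :: pr) 0 w = 1 := by unfold pvStep; simp
      cases pr with
      | nil =>
        rw [if_pos (show ([w] : List String).length = 1 from rfl)]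
        have h1 : 1 ≤ ts.foldl (pvStep [w]) 1 := pvFold_le [w] ts 1
        simp only [List.foldl, hstep0]
        exact (decide_eq_true (by simpa using h1)).symm
      | cons a l =>
        have hlen : (w :: a :: l).length ≠ 1 := by simp
        rw [if_neg hlen]
        have hslice : PySem.List.slice (w :: a :: l) (some 1) none = a :: l := by
          simp [PySem.List.slice]
        rw [hslice, ih (a :: l) (by simp)]
        simp only [List.foldl, hstep0, pvFold_shift, List.length_cons]
        rw [decide_eq_decide]
        omega
    · rw [if_neg hw, ih _ hpw]
      have hstep : pvStep (p0 :: pr) 0 w = 0 := by unfold pvStep; simp [hw]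
      simp [List.foldl, hstep]

theorem pvAlt_eq (pw ts : List String) :
    phrase_words_in_text_words_alt pw ts = decide (pw.length ≤ ts.foldl (pvStep pw) 0) := rfl

-- ===== VERDICT (by name: the statement is the Claim_ definition above) =====
theorem phrase_words_in_text_words_spec : Claim_equal_phrase_words_in_text_words := by
  intro pw ts _ hpre
  unfold Spec_phrase_words_in_text_words
  rw [pvAlt_eq, pvMain ts pw hpre]
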